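-- pv_equiv track=rewrite | github.com/kymatio/kymatio | kymatio/scattering2d/tests/test_torch_scattering2d.py | reorder_coefficients_from_interleaved
-- ===== SOURCE A (Python) =====
-- def reorder_coefficients_from_interleaved(J, L):
--     # helper function to obtain positions of order0, order1, order2
--     # from interleaved
--     order0, order1, order2 = [], [], []
--     n_order0, n_order1, n_order2 = 1, J * L, L ** 2 * J * (J - 1) // 2
--     n = 0
--     order0.append(n)
--     for j1 in range(J):
--         for l1 in range(L):
--             n += 1
--             order1.append(n)
--             for j2 in range(j1 + 1, J):
--                 for l2 in range(L):
--                     n += 1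
--                     order2.append(n)
--
--     assert len(order0) == n_order0
--     assert len(order1) == n_order1
--     assert len(order2) == n_order2
--
--     return order0, order1, order2
-- ===== SOURCE B (Python) =====
-- def reorder_coefficients_from_interleaved(J, L):
--     # Direct closed-form indexing: each position is computed independently from a
--     # prefix-sum formula, with no running counter and no sequential dependency.
--     c = lambda j1: 1 + (J - 1 - j1) * L          # stride of one (j1, l1) block
--     # start(j1, l1): 1 + total length of all blocks before (j1, l1)
--     start = lambda j1, l1: 1 + j1 * L + L * L * (j1 * (J - 1) - j1 * (j1 - 1) // 2) + l1 * c(j1)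
--     order1 = [start(j1, l1) for j1 in range(J) for l1 in range(L)]
--     order2 = [start(j1, l1) + 1 + k
--               for j1 in range(J) for l1 in range(L)
--               for k in range((J - 1 - j1) * L)]
--     return [0], order1, order2
-- ===== Notes on version B (the rewrite author's own statement) =====
-- stated objective: alternative
-- what changed: B abandons A's sequentially-threaded counter entirely: each index is computed independently by a closed-form prefix-sum formula start(j1,l1)=1+j1*L+L^2*(j1*(J-1)-j1*(j1-1)//2)+l1*(1+(J-1-j1)*L), so order1 and order2 are filled by direct indexing with no running state.
import Mathlib
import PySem

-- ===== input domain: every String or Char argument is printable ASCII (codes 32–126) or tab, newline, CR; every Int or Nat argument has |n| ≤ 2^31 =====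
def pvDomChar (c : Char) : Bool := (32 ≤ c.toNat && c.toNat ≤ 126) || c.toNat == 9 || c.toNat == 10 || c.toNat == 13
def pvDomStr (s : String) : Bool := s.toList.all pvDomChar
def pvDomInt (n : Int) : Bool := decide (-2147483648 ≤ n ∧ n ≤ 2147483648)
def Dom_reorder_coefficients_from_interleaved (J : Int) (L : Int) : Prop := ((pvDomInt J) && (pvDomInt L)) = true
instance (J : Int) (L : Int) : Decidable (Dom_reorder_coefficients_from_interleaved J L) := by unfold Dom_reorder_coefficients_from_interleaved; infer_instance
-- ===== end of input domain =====

-- B replaces A's sequential counter by closed-form direct indexing of every position; objective: alternative.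

-- ===== PORT A =====
-- Literal port of A's four nested loops over state (n, order1, order2); order0 is [0].
-- A's trailing asserts hold on every input Pre_ admits (Pre_ excludes exactly the AssertionError inputs).
def reorder_coefficients_from_interleaved (J : Int) (L : Int) : List Int × List Int × List Int :=
  let order0 : List Int := [0]
  let s :=
    (PySem.List.pyRange 0 J 1).foldl (fun s j1 =>
      (PySem.List.pyRange 0 L 1).foldl (fun s _l1 =>
        let n := s.1 + 1
        let t :=
          (PySem.List.pyRange (j1 + 1) J 1).foldl (fun t _j2 =>
            (PySem.List.pyRange 0 L 1).foldl (fun t _l2 =>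
              (t.1 + 1, t.2 ++ [t.1 + 1])) t) (n, s.2.2)
        (t.1, s.2.1 ++ [n], t.2)) s)
      ((0 : Int), ([] : List Int), ([] : List Int))
  (order0, s.2.1, s.2.2)

-- ===== PORT B =====
-- Port of Source B: start(j1, l1) = 1 + (total length of all blocks before (j1, l1)), in closed form.
def pvStart (J : Int) (L : Int) (j1 : Int) (l1 : Int) : Int :=
  1 + j1 * L + L * L * (j1 * (J - 1) - PySem.Int.floordiv (j1 * (j1 - 1)) 2)
    + l1 * (1 + (J - 1 - j1) * L)

def reorder_coefficients_from_interleaved_alt (J : Int) (L : Int) : List Int × List Int × List Int :=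
  let order1 :=
    (PySem.List.pyRange 0 J 1).flatMap (fun j1 =>
      (PySem.List.pyRange 0 L 1).map (fun l1 => pvStart J L j1 l1))
  let order2 :=
    (PySem.List.pyRange 0 J 1).flatMap (fun j1 =>
      (PySem.List.pyRange 0 L 1).flatMap (fun l1 =>
        (PySem.List.pyRange 0 ((J - 1 - j1) * L) 1).map (fun k => pvStart J L j1 l1 + 1 + k)))
  (([0] : List Int), order1, order2)

-- ===== PRECONDITION & SPEC =====
-- Pre_ excludes exactly the inputs where A's asserts fail (AssertionError): J and L of
-- which one is strictly negative and neither is zero; A returns on all other inputs.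
def Pre_reorder_coefficients_from_interleaved (J : Int) (L : Int) : Prop :=
  (0 ≤ J ∧ 0 ≤ L) ∨ J = 0 ∨ L = 0
instance (J : Int) (L : Int) : Decidable (Pre_reorder_coefficients_from_interleaved J L) := by unfold Pre_reorder_coefficients_from_interleaved; infer_instance
def pvWitness_reorder_coefficients_from_interleaved : Int × Int := (2, 2)

def Spec_reorder_coefficients_from_interleaved (J : Int) (L : Int) (out : List Int × List Int × List Int) : Prop := out = reorder_coefficients_from_interleaved_alt J L
instance (J : Int) (L : Int) (out : List Int × List Int × List Int) : Decidable (Spec_reorder_coefficients_from_interleaved J L out) := by unfold Spec_reorder_coefficients_from_interleaved; infer_instance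

-- ===== CLAIM (what is proved, stated in full; the proofs are below) =====
def Claim_equal_reorder_coefficients_from_interleaved : Prop := ∀ (J : Int) (L : Int), Dom_reorder_coefficients_from_interleaved J L → Pre_reorder_coefficients_from_interleaved J L → Spec_reorder_coefficients_from_interleaved J L (reorder_coefficients_from_interleaved J L)

-- ===== LEMMAS AND PROOFS =====

-- The running counter of A just before entering block j1 (= pvStart J L j1 0 - 1).
def pvN (J : Int) (L : Int) (a : Int) : Int :=
  a * L + L * L * (a * (J - 1) - PySem.Int.floordiv (a * (a - 1)) 2)

lemma pv_N_succ (J L a : Int) : pvN J L (a + 1) = pvN J L a + L * (1 + (J - 1 - a) * L) := by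
  unfold pvN
  rw [PySem.Int.floordiv_eq_ediv_of_pos (by norm_num), PySem.Int.floordiv_eq_ediv_of_pos (by norm_num)]
  have h : (a + 1) * (a + 1 - 1) = a * (a - 1) + 2 * a := by ring
  rw [h]
  have h2 : ∀ m : Int, (m + 2 * a) / 2 = m / 2 + a := by intro m; omega
  rw [h2]
  ring

-- A's innermost l2-loop over any list: each step bumps n and appends it.
lemma pv_inner1 (xs : List Int) (n : Int) (acc : List Int) :
    xs.foldl (fun t (_ : Int) => (t.1 + 1, t.2 ++ [t.1 + 1])) (n, acc)
      = (n + xs.length, acc ++ PySem.List.pyRange (n + 1) (n + 1 + xs.length) 1) := by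
  induction xs generalizing n acc with
  | nil => simp
  | cons x xs ih =>
      rw [List.foldl_cons, ih]
      simp only [List.length_cons, Nat.cast_add, Nat.cast_one]
      rw [show n + 1 + ((xs.length : Int) + 1) = n + 1 + 1 + (xs.length : Int) from by ring,
        PySem.List.pyRange_one_cons (a := n + 1) (b := n + 1 + 1 + (xs.length : Int)) (by omega)]
      simp only [Prod.mk.injEq]
      exact ⟨by ring, by simp⟩

-- A's j2×l2 double loop: counter advances by len·L, appending one contiguous range.
lemma pv_inner2 (xs : List Int) (L : Int) (hL : 0 ≤ L) (n : Int) (acc : List Int) :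
    xs.foldl (fun t (_ : Int) =>
        (PySem.List.pyRange 0 L 1).foldl (fun t (_ : Int) => (t.1 + 1, t.2 ++ [t.1 + 1])) t) (n, acc)
      = (n + xs.length * L, acc ++ PySem.List.pyRange (n + 1) (n + 1 + xs.length * L) 1) := by
  induction xs generalizing n acc with
  | nil => simp
  | cons x xs ih =>
      rw [List.foldl_cons, pv_inner1, ih]
      have hlen : ((PySem.List.pyRange 0 L 1).length : Int) = L := by
        rw [PySem.List.length_pyRange_one]; omega
      rw [hlen]
      simp only [List.length_cons, Nat.cast_add, Nat.cast_one, List.append_assoc]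
      have hnn : (0:Int) ≤ (xs.length : Int) * L := by positivity
      simp only [Prod.mk.injEq]
      rw [show n + L + 1 = n + 1 + L from by ring,
        show n + 1 + ((xs.length:Int) + 1) * L = n + 1 + L + (xs.length:Int) * L from by ring,
        ← PySem.List.pyRange_one_append (n + 1) (n + 1 + L) (n + 1 + L + (xs.length:Int) * L)
            (by omega) (by linarith)]
      exact ⟨by ring, rfl⟩

-- A's middle l1-loop, with the inner double loop already summarized into a block of size b.
lemma pv_mid (b n : Int) (o1 o2 : List Int) (xs : List Int) :
    xs.foldl (fun s (_ : Int) =>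
        (s.1 + 1 + b, s.2.1 ++ [s.1 + 1], s.2.2 ++ PySem.List.pyRange (s.1 + 2) (s.1 + 2 + b) 1))
      (n, o1, o2)
      = (n + xs.length * (1 + b),
         o1 ++ (List.range xs.length).map (fun i : Nat => n + 1 + (i : Int) * (1 + b)),
         o2 ++ (List.range xs.length).flatMap
            (fun i : Nat => PySem.List.pyRange (n + 2 + (i : Int) * (1 + b)) (n + 2 + (i : Int) * (1 + b) + b) 1)) := by
  induction xs generalizing n o1 o2 with
  | nil => simp
  | cons x xs ih =>
      rw [List.foldl_cons, ih]
      have hf : (fun i : Nat => n + 1 + ((Nat.succ i : Nat) : Int) * (1 + b))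
          = (fun i : Nat => (n + 1 + b) + 1 + (i : Int) * (1 + b)) := by
        funext i; push_cast; ring
      have hg : (fun i : Nat => PySem.List.pyRange (n + 2 + ((Nat.succ i : Nat) : Int) * (1 + b))
              (n + 2 + ((Nat.succ i : Nat) : Int) * (1 + b) + b) 1)
          = (fun i : Nat => PySem.List.pyRange ((n + 1 + b) + 2 + (i : Int) * (1 + b))
              ((n + 1 + b) + 2 + (i : Int) * (1 + b) + b) 1) := by
        funext i; congr 1 <;> push_cast <;> ring
      rw [List.length_cons, List.range_succ_eq_map, List.map_cons, List.map_map,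
        List.flatMap_cons, List.flatMap_map]
      simp only [Function.comp_def, hf, hg, Nat.cast_zero, zero_mul, add_zero,
        List.append_assoc, List.singleton_append, Nat.cast_add, Nat.cast_one,
        Prod.mk.injEq]
      exact ⟨by ring, trivial⟩

-- pvStart in terms of pvN.
lemma pv_start_eq (J L a l1 : Int) : pvStart J L a l1 = pvN J L a + 1 + l1 * (1 + (J - 1 - a) * L) := by
  unfold pvStart pvN; ring

-- The outer j1-loop (over the suffix pyRange a J 1, counter starting at pvN a)
-- produces exactly B's flatMap segments.
lemma pv_outer (J L : Int) (hL : 0 ≤ L) :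
    ∀ (k : Nat) (a : Int), a + k = J → ∀ (o1 o2 : List Int),
    ((PySem.List.pyRange a J 1).foldl (fun s j1 =>
        (PySem.List.pyRange 0 L 1).foldl (fun s (_ : Int) =>
          (s.1 + 1 + (J - 1 - j1) * L, s.2.1 ++ [s.1 + 1],
           s.2.2 ++ PySem.List.pyRange (s.1 + 2) (s.1 + 2 + (J - 1 - j1) * L) 1)) s)
      (pvN J L a, o1, o2)).2
      = (o1 ++ (PySem.List.pyRange a J 1).flatMap (fun j1 =>
            (PySem.List.pyRange 0 L 1).map (fun l1 => pvStart J L j1 l1)),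
         o2 ++ (PySem.List.pyRange a J 1).flatMap (fun j1 =>
            (PySem.List.pyRange 0 L 1).flatMap (fun l1 =>
              (PySem.List.pyRange 0 ((J - 1 - j1) * L) 1).map (fun k => pvStart J L j1 l1 + 1 + k)))) := by
  intro k
  induction k with
  | zero =>
      intro a ha o1 o2
      rw [PySem.List.pyRange_one_eq_nil (show J ≤ a by omega)]
      simp
  | succ k ih =>
      intro a ha o1 o2
      rw [PySem.List.pyRange_one_cons (show a < J by omega), List.foldl_cons, pv_mid]
      have hlen : ((PySem.List.pyRange 0 L 1).length : Int) = L := by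
        rw [PySem.List.length_pyRange_one]; omega
      have hlenN : (PySem.List.pyRange 0 L 1).length = L.toNat := by
        rw [PySem.List.length_pyRange_one]; omega
      rw [hlen, ← pv_N_succ J L a, ih (a + 1) (by omega)]
      simp only [List.flatMap_cons, ← List.append_assoc]
      -- per-j1 segment for j1 = a, order1 part
      have seg1 : (List.range (PySem.List.pyRange 0 L 1).length).map
            (fun i : Nat => pvN J L a + 1 + (i : Int) * (1 + (J - 1 - a) * L))
          = (PySem.List.pyRange 0 L 1).map (fun l1 => pvStart J L a l1) := by
        rw [hlenN, PySem.List.pyRange_one 0 L, List.map_map]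
        have hz : ((L : Int) - 0).toNat = L.toNat := by omega
        rw [hz]
        refine List.map_congr_left ?_
        intro i _
        simp only [Function.comp_def]
        rw [pv_start_eq]; ring
      -- per-j1 segment for j1 = a, order2 part
      have seg2 : (List.range (PySem.List.pyRange 0 L 1).length).flatMap
            (fun i : Nat => PySem.List.pyRange (pvN J L a + 2 + (i : Int) * (1 + (J - 1 - a) * L))
              (pvN J L a + 2 + (i : Int) * (1 + (J - 1 - a) * L) + (J - 1 - a) * L) 1)
          = (PySem.List.pyRange 0 L 1).flatMap (fun l1 =>
              (PySem.List.pyRange 0 ((J - 1 - a) * L) 1).map (fun k => pvStart J L a l1 + 1 + k)) := by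
        rw [hlenN, PySem.List.pyRange_one 0 L, List.flatMap_map]
        have hz : ((L : Int) - 0).toNat = L.toNat := by omega
        rw [hz]
        refine List.flatMap_congr ?_
        intro i _
        rw [pv_start_eq,
          PySem.List.pyRange_one 0 ((J - 1 - a) * L),
          PySem.List.pyRange_one (pvN J L a + 2 + (i : Int) * (1 + (J - 1 - a) * L))
            (pvN J L a + 2 + (i : Int) * (1 + (J - 1 - a) * L) + (J - 1 - a) * L),
          List.map_map]
        have harg : (pvN J L a + 2 + (i : Int) * (1 + (J - 1 - a) * L) + (J - 1 - a) * L
            - (pvN J L a + 2 + (i : Int) * (1 + (J - 1 - a) * L))).toNat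
            = ((J - 1 - a) * L - 0).toNat := by omega
        rw [harg]
        refine List.map_congr_left ?_
        intro j _
        simp only [Function.comp_def]
        ring
      rw [seg1, seg2]

-- ===== VERDICT (by name: the statement is the Claim_ definition above) =====
theorem reorder_coefficients_from_interleaved_spec : Claim_equal_reorder_coefficients_from_interleaved := by
  intro J L _ hPre
  unfold Spec_reorder_coefficients_from_interleaved
  have hcase : (0 ≤ L ∧ 0 ≤ J) ∨ J ≤ 0 := by
    unfold Pre_reorder_coefficients_from_interleaved at hPre; omega
  rcases hcase with ⟨hL, hJ⟩ | hJ
  · -- main case: 0 ≤ L, 0 ≤ J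
    unfold reorder_coefficients_from_interleaved reorder_coefficients_from_interleaved_alt
    have hcongr := PySem.List.foldl_congr_mem
      (l := PySem.List.pyRange 0 J 1)
      (init := ((0 : Int), ([] : List Int), ([] : List Int)))
      (f := fun s j1 =>
        (PySem.List.pyRange 0 L 1).foldl (fun s _l1 =>
          let n := s.1 + 1
          let t :=
            (PySem.List.pyRange (j1 + 1) J 1).foldl (fun t _j2 =>
              (PySem.List.pyRange 0 L 1).foldl (fun t _l2 =>
                (t.1 + 1, t.2 ++ [t.1 + 1])) t) (n, s.2.2)
          (t.1, s.2.1 ++ [n], t.2)) s)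
      (g := fun s j1 =>
        (PySem.List.pyRange 0 L 1).foldl (fun s (_ : Int) =>
          (s.1 + 1 + (J - 1 - j1) * L, s.2.1 ++ [s.1 + 1],
           s.2.2 ++ PySem.List.pyRange (s.1 + 2) (s.1 + 2 + (J - 1 - j1) * L) 1)) s)
      ?_
    · rw [hcongr]
      have h0 : pvN J L 0 = 0 := by
        unfold pvN
        rw [show (0 : Int) * (0 - 1) = 0 from by ring,
          PySem.Int.floordiv_eq_ediv_of_pos (show (0:Int) < 2 by norm_num)]
        norm_num
      have hout := pv_outer J L hL J.toNat 0 (by omega) [] []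
      rw [h0] at hout
      simp only [List.nil_append] at hout
      simp only [hout]
    · intro acc j1 hj1
      have hj1' : 0 ≤ j1 ∧ j1 < J := (PySem.List.mem_pyRange_one).1 hj1
      apply PySem.List.foldl_congr_mem
      intro u _ _
      simp only
      rw [pv_inner2 _ _ hL]
      have hlen : ((PySem.List.pyRange (j1 + 1) J 1).length : Int) = J - 1 - j1 := by
        rw [PySem.List.length_pyRange_one]; omega
      rw [hlen]
      have h2 : u.1 + 1 + 1 = u.1 + 2 := by ring
      rw [h2]
  · -- J ≤ 0: both outer j1-ranges are empty
    unfold reorder_coefficients_from_interleaved reorder_coefficients_from_interleaved_alt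
    rw [PySem.List.pyRange_one_eq_nil (show J ≤ (0:Int) by omega)]
    simp
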